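-- pv_equiv track=rewrite | github.com/bluemanacs-ui/dataprismai | apps/api/app/services/chart_service.py | _latest_period_bar
-- ===== SOURCE A (Python) =====
-- def _latest_period_bar(rows: list[dict], group_key: str, value_key: str) -> list[dict]:
--     latest_key = max(row["month"] for row in rows if "month" in row)
--     latest_rows = [row for row in rows if row.get("month") == latest_key]
--
--     return [
--         {
--             group_key: row.get(group_key),
--             "value": row.get(value_key),
--         }
--         for row in latest_rows
--     ]
-- ===== SOURCE B (Python) =====
-- def _latest_period_bar(rows: list[dict], group_key: str, value_key: str) -> list[dict]:
--     groups = {}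
--     for row in rows:
--         if "month" in row:
--             groups.setdefault(row["month"], []).append(row)
--     latest = max(groups)  # ValueError when no row has a "month", like A
--     return [
--         {group_key: row.get(group_key), "value": row.get(value_key)}
--         for row in groups[latest]
--     ]
-- ===== Notes on version B (the rewrite author's own statement) =====
-- stated objective: alternative
-- what changed: B makes one grouping pass building a month->rows dict, takes max over the dict's keys, and projects only the bucket of the latest month, instead of A's separate max-over-generator followed by a full filtering pass over all rows.
import Mathlib
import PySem

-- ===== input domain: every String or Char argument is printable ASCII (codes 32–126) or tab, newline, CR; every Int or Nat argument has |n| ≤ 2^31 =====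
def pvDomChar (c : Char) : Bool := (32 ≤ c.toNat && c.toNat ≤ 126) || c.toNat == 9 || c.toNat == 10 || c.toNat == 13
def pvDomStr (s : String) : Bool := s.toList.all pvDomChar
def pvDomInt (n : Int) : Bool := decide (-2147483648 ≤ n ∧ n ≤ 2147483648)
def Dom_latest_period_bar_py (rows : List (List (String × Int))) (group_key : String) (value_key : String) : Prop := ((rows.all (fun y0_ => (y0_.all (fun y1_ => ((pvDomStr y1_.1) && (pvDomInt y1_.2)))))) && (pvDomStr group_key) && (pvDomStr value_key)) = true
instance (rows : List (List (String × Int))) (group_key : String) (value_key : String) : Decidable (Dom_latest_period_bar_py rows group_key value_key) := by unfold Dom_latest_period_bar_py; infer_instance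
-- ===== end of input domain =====

-- B groups rows by month in one dict pass and projects the max key's bucket; A takes a max over a generator and then re-filters all rows. Same cost, different decomposition.

-- shared primitive: Python's row.get(k) on a row dict (first-match lookup)
def rowGet? (row : List (String × Int)) (k : String) : Option Int :=
  (PySem.Dict.mk row).get? k

-- the projected output row {group_key: row.get(group_key), "value": row.get(value_key)};
-- .getD 0 is exact only when the key is present (Pre_ guarantees it for every emitted row)
def projRow (group_key value_key : String) (row : List (String × Int)) : List (String × Int) :=
  ((PySem.Dict.empty.insert group_key ((rowGet? row group_key).getD 0)).insert "value" ((rowGet? row value_key).getD 0)).items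

-- ===== PORT A =====
def latest_period_bar_py (rows : List (List (String × Int))) (group_key : String) (value_key : String) : List (List (String × Int)) :=
  -- max(row["month"] for row in rows if "month" in row); .getD 0 unreachable under Pre_ (max of [] raises)
  let latest_key : Int := (PySem.List.max? ((rows.filter (fun r => (PySem.Dict.mk r).contains "month")).map (fun r => (rowGet? r "month").getD 0)) (fun x => x)).getD 0
  let latest_rows := rows.filter (fun r => rowGet? r "month" == some latest_key)
  latest_rows.map (projRow group_key value_key)

-- ===== PORT B =====
-- the body of B's grouping loop: groups.setdefault(row["month"], []).append(row) when "month" in row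
def bstep (d : PySem.Dict Int (List (List (String × Int)))) (row : List (String × Int)) : PySem.Dict Int (List (List (String × Int))) :=
  match rowGet? row "month" with
  | some m => d.modify m [] (· ++ [row])
  | none => d

def latest_period_bar_py_alt (rows : List (List (String × Int))) (group_key : String) (value_key : String) : List (List (String × Int)) :=
  let groups : PySem.Dict Int (List (List (String × Int))) :=
    rows.foldl bstep PySem.Dict.empty
  let latest : Int := (PySem.List.max? groups.keys (fun x => x)).getD 0  -- max(groups); .getD 0 unreachable under Pre_
  (groups.getD latest []).map (projRow group_key value_key)

-- ===== PRECONDITION & SPEC =====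
-- Pre_ excludes inputs on which the Python A raises ValueError (no row has a "month" key) or returns
-- dicts with None values, outside the declared list[dict[str,int]] type (a row of the latest month
-- lacking group_key or value_key).
def Pre_latest_period_bar_py (rows : List (List (String × Int))) (group_key : String) (value_key : String) : Prop :=
  (rows.any (fun r => (PySem.Dict.mk r).contains "month")) = true ∧
  (rows.all (fun r =>
    match rowGet? r "month" with
    | none => true
    | some m =>
      if rows.all (fun r' =>
          match rowGet? r' "month" with
          | none => true
          | some m' => decide (m' ≤ m)) then
        (PySem.Dict.mk r).contains group_key && (PySem.Dict.mk r).contains value_key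
      else true)) = true
instance (rows : List (List (String × Int))) (group_key : String) (value_key : String) : Decidable (Pre_latest_period_bar_py rows group_key value_key) := by unfold Pre_latest_period_bar_py; infer_instance

def pvWitness_latest_period_bar_py : (List (List (String × Int))) × String × String :=
  ([[("month", 1), ("g", 2), ("v", 3)], [("month", 2), ("g", 4), ("v", 5)]], "g", "v")

def Spec_latest_period_bar_py (rows : List (List (String × Int))) (group_key : String) (value_key : String) (out : List (List (String × Int))) : Prop := out = latest_period_bar_py_alt rows group_key value_key
instance (rows : List (List (String × Int))) (group_key : String) (value_key : String) (out : List (List (String × Int))) : Decidable (Spec_latest_period_bar_py rows group_key value_key out) := by unfold Spec_latest_period_bar_py; infer_instance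

-- ===== CLAIM (what is proved, stated in full; the proofs are below) =====
def Claim_equal_latest_period_bar_py : Prop := ∀ (rows : List (List (String × Int))) (group_key : String) (value_key : String), Dom_latest_period_bar_py rows group_key value_key → Pre_latest_period_bar_py rows group_key value_key → Spec_latest_period_bar_py rows group_key value_key (latest_period_bar_py rows group_key value_key)

-- ===== LEMMAS AND PROOFS =====

lemma bucket_getD (rows : List (List (String × Int))) (d : PySem.Dict Int (List (List (String × Int)))) (m : Int) :
    (rows.foldl bstep d).getD m [] = d.getD m [] ++ rows.filter (fun r => rowGet? r "month" == some m) := by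
  induction rows generalizing d with
  | nil => simp
  | cons r t ih =>
    simp only [List.foldl_cons, List.filter_cons]
    cases h : rowGet? r "month" with
    | none => simp [bstep, h, ih]
    | some m' =>
      simp only [bstep, h, ih, PySem.Dict.getD_modify]
      by_cases hm : m = m'
      · subst hm; simp
      · simp [hm, Ne.symm hm]

lemma bucket_keys (rows : List (List (String × Int))) (d : PySem.Dict Int (List (List (String × Int)))) (m : Int) :
    m ∈ (rows.foldl bstep d).keys ↔ m ∈ d.keys ∨ ∃ r ∈ rows, rowGet? r "month" = some m := by
  induction rows generalizing d with
  | nil => simp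
  | cons r t ih =>
    simp only [List.foldl_cons, List.mem_cons]
    cases h : rowGet? r "month" with
    | none =>
      simp only [bstep, h]
      rw [ih]
      constructor
      · rintro (hk | ⟨r', hr', hm'⟩)
        · exact Or.inl hk
        · exact Or.inr ⟨r', Or.inr hr', hm'⟩
      · rintro (hk | ⟨r', hr' | hr', hm'⟩)
        · exact Or.inl hk
        · subst hr'; rw [h] at hm'; cases hm'
        · exact Or.inr ⟨r', hr', hm'⟩
    | some m' =>
      simp only [bstep, h, ih, PySem.Dict.keys_modify, PySem.Dict.mem_keys_insert]
      constructor
      · rintro ((hk | hk) | ⟨r', hr', hm'⟩)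
        · exact Or.inr ⟨r, Or.inl rfl, by rw [h, hk]⟩
        · exact Or.inl hk
        · exact Or.inr ⟨r', Or.inr hr', hm'⟩
      · rintro (hk | ⟨r', hr' | hr', hm'⟩)
        · exact Or.inl (Or.inr hk)
        · subst hr'; rw [h] at hm'; exact Or.inl (Or.inl (Option.some.inj hm').symm)
        · exact Or.inr ⟨r', hr', hm'⟩

lemma max_congr (xs ys : List Int) (h : ∀ m : Int, m ∈ xs ↔ m ∈ ys) :
    PySem.List.max? xs (fun x => x) = PySem.List.max? ys (fun x => x) := by
  cases hx : PySem.List.max? xs (fun x => x) with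
  | none =>
    cases hy : PySem.List.max? ys (fun x => x) with
    | none => rfl
    | some b =>
      have hb : b ∈ xs := (h b).mpr (PySem.List.max?_mem hy)
      rw [(PySem.List.max?_eq_none_iff xs _).mp hx] at hb
      cases hb
  | some a =>
    cases hy : PySem.List.max? ys (fun x => x) with
    | none =>
      have ha : a ∈ ys := (h a).mp (PySem.List.max?_mem hx)
      rw [(PySem.List.max?_eq_none_iff ys _).mp hy] at ha
      cases ha
    | some b =>
      have h1 : a ≤ b := PySem.List.max?_isMax hy a ((h a).mp (PySem.List.max?_mem hx))
      have h2 : b ≤ a := PySem.List.max?_isMax hx b ((h b).mpr (PySem.List.max?_mem hy))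
      rw [le_antisymm h1 h2]

-- membership in A's months list ↔ some row has that month
lemma months_mem (rows : List (List (String × Int))) (m : Int) :
    m ∈ (rows.filter (fun r => (PySem.Dict.mk r).contains "month")).map (fun r => (rowGet? r "month").getD 0) ↔
      ∃ r ∈ rows, rowGet? r "month" = some m := by
  simp only [List.mem_map, List.mem_filter]
  constructor
  · rintro ⟨r, ⟨hr, hc⟩, hm⟩
    rw [PySem.Dict.contains_eq_isSome_get?] at hc
    refine ⟨r, hr, ?_⟩
    cases h : rowGet? r "month" with
    | none => rw [show (PySem.Dict.mk r).get? "month" = rowGet? r "month" from rfl, h] at hc; cases hc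
    | some v => rw [h] at hm; simp at hm; rw [hm]
  · rintro ⟨r, hr, hm⟩
    exact ⟨r, ⟨hr, by rw [PySem.Dict.contains_eq_isSome_get?,
      show (PySem.Dict.mk r).get? "month" = rowGet? r "month" from rfl, hm]; rfl⟩, by rw [hm]; rfl⟩

-- ===== VERDICT (by name: the statement is the Claim_ definition above) =====
theorem latest_period_bar_py_spec : Claim_equal_latest_period_bar_py := by
  intro rows group_key value_key _ _
  show latest_period_bar_py rows group_key value_key = latest_period_bar_py_alt rows group_key value_key
  simp only [latest_period_bar_py, latest_period_bar_py_alt]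
  have hmax : PySem.List.max? ((rows.filter (fun r => (PySem.Dict.mk r).contains "month")).map (fun r => (rowGet? r "month").getD 0)) (fun x => x)
      = PySem.List.max? (rows.foldl bstep PySem.Dict.empty).keys (fun x => x) := by
    apply max_congr
    intro m
    rw [months_mem, bucket_keys]
    simp [PySem.Dict.keys_empty]
  rw [hmax, bucket_getD]
  simp [PySem.Dict.getD_empty]
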